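-- pv_equiv track=rewrite | github.com/Joshlete/FW-Test-Tool | V2/keybindings.py | combine_keys
-- ===== SOURCE A (Python) =====
-- def combine_keys(key_set):
--     """Combine keys into a single representation."""
--     modifiers = ['<ctrl>', '<shift>', '<alt>']
--     combined = []
--     normal_keys = []
--
--     for key in key_set:
--         if key in modifiers:
--             combined.append(key)
--         else:
--             normal_keys.append(key)
--
--     combined.sort()  # Sort modifiers alphabetically
--     combined.extend(normal_keys)  # Add normal keys after modifiers
--
--     return '+'.join(combined)
-- ===== SOURCE B (Python) =====
-- def combine_keys(key_set):
--     """Combine keys into a single representation."""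
--     counts = {'<alt>': 0, '<ctrl>': 0, '<shift>': 0}
--     normal_keys = []
--     for key in key_set:
--         if key in counts:
--             counts[key] += 1
--         else:
--             normal_keys.append(key)
--     parts = []
--     for mod in ('<alt>', '<ctrl>', '<shift>'):
--         parts.extend([mod] * counts[mod])
--     parts.extend(normal_keys)
--     return '+'.join(parts)
-- ===== Notes on version B (the rewrite author's own statement) =====
-- stated objective: alternative
-- what changed: Replaces the collect-then-comparison-sort of modifiers by a single-pass tally of the three known modifiers plus fixed-priority bucket emission (replicate each modifier by its count in alphabetical order), so no sort is performed.
import Mathlib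
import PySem

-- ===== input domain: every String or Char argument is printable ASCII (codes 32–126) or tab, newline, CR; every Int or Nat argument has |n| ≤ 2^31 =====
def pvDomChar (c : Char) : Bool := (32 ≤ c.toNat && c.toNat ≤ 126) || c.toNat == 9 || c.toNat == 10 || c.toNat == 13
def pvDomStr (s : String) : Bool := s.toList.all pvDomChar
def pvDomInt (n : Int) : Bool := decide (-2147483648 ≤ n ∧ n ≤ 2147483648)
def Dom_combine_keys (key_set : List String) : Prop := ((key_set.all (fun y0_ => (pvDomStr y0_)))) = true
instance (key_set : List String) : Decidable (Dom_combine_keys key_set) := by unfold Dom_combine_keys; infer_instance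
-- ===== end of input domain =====

-- B replaces A's collect-then-sort of modifiers by a one-pass tally of the three known
-- modifiers plus fixed-priority emission (no sort); same return value, alternative algorithm.

-- ===== PORT A =====
def combine_keys (key_set : List String) : String :=
  let modifiers : List String := ["<ctrl>", "<shift>", "<alt>"]
  let p := key_set.foldl
    (fun (acc : List String × List String) key =>
      if key ∈ modifiers then (acc.1 ++ [key], acc.2) else (acc.1, acc.2 ++ [key]))
    ([], [])
  let combined := PySem.List.sorted p.1 (fun x => x) false
  PySem.Str.join "+" (combined ++ p.2)

-- ===== PORT B =====
def combine_keys_alt (key_set : List String) : String :=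
  let st := key_set.foldl
    (fun (st : Nat × Nat × Nat × List String) key =>
      if key = "<alt>" then (st.1 + 1, st.2.1, st.2.2.1, st.2.2.2)
      else if key = "<ctrl>" then (st.1, st.2.1 + 1, st.2.2.1, st.2.2.2)
      else if key = "<shift>" then (st.1, st.2.1, st.2.2.1 + 1, st.2.2.2)
      else (st.1, st.2.1, st.2.2.1, st.2.2.2 ++ [key]))
    (0, 0, 0, [])
  PySem.Str.join "+"
    (List.replicate st.1 "<alt>" ++ List.replicate st.2.1 "<ctrl>" ++
     List.replicate st.2.2.1 "<shift>" ++ st.2.2.2)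

-- ===== PRECONDITION & SPEC =====
def Spec_combine_keys (key_set : List String) (out : String) : Prop := out = combine_keys_alt key_set
instance (key_set : List String) (out : String) : Decidable (Spec_combine_keys key_set out) := by unfold Spec_combine_keys; infer_instance

-- ===== CLAIM (what is proved, stated in full; the proofs are below) =====
def Claim_equal_combine_keys : Prop := ∀ (key_set : List String), Dom_combine_keys key_set → Spec_combine_keys key_set (combine_keys key_set)

-- ===== LEMMAS AND PROOFS =====

theorem mod_le_helper : ("<alt>" : String) ≤ "<ctrl>" ∧ ("<alt>" : String) ≤ "<shift>" ∧ ("<ctrl>" : String) ≤ "<shift>" := by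
  refine ⟨le_of_lt ?_, le_of_lt ?_, le_of_lt ?_⟩ <;> rw [String.lt_iff_toList_lt] <;> decide

-- A's fold splits the input into the modifier occurrences and the rest, in order.
theorem A_fold_eq (ks : List String) (cb nm : List String) :
    ks.foldl
      (fun (acc : List String × List String) key =>
        if key ∈ ["<ctrl>", "<shift>", "<alt>"] then (acc.1 ++ [key], acc.2)
        else (acc.1, acc.2 ++ [key]))
      (cb, nm)
    = (cb ++ ks.filter (fun k => decide (k ∈ ["<ctrl>", "<shift>", "<alt>"])),
       nm ++ ks.filter (fun k => !decide (k ∈ ["<ctrl>", "<shift>", "<alt>"]))) := by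
  induction ks generalizing cb nm with
  | nil => simp
  | cons k t ih =>
    simp only [List.foldl_cons]
    by_cases h1 : k = "<ctrl>"
    · subst h1; rw [if_pos (by simp), ih]; simp
    · by_cases h2 : k = "<shift>"
      · subst h2; rw [if_pos (by simp), ih]; simp
      · by_cases h3 : k = "<alt>"
        · subst h3; rw [if_pos (by simp), ih]; simp
        · rw [if_neg (by simp [h1, h2, h3]), ih]
          simp [h1, h2, h3]

-- B's fold tallies the three modifiers and collects the rest, in order.
theorem B_fold_eq (ks : List String) (a c s : Nat) (nm : List String) :
    ks.foldl
      (fun (st : Nat × Nat × Nat × List String) key =>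
        if key = "<alt>" then (st.1 + 1, st.2.1, st.2.2.1, st.2.2.2)
        else if key = "<ctrl>" then (st.1, st.2.1 + 1, st.2.2.1, st.2.2.2)
        else if key = "<shift>" then (st.1, st.2.1, st.2.2.1 + 1, st.2.2.2)
        else (st.1, st.2.1, st.2.2.1, st.2.2.2 ++ [key]))
      (a, c, s, nm)
    = (a + ks.count "<alt>", c + ks.count "<ctrl>", s + ks.count "<shift>",
       nm ++ ks.filter (fun k => !decide (k ∈ ["<ctrl>", "<shift>", "<alt>"]))) := by
  induction ks generalizing a c s nm with
  | nil => simp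
  | cons k t ih =>
    by_cases h1 : k = "<alt>"
    · subst h1; simp [List.foldl_cons, ih]; omega
    · by_cases h2 : k = "<ctrl>"
      · subst h2; simp [List.foldl_cons, ih]; omega
      · by_cases h3 : k = "<shift>"
        · subst h3; simp [List.foldl_cons, ih]; omega
        · simp [List.foldl_cons, h1, h2, h3, ih]

-- The sorted modifier list is the alphabetical replicate concatenation.
theorem sorted_mods (ks : List String) :
    PySem.List.sorted (ks.filter (fun k => decide (k ∈ ["<ctrl>", "<shift>", "<alt>"])))
      (fun x => x) false
    = List.replicate (ks.count "<alt>") "<alt>" ++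
      List.replicate (ks.count "<ctrl>") "<ctrl>" ++
      List.replicate (ks.count "<shift>") "<shift>" := by
  apply PySem.List.sorted_id_eq_of_perm_of_pairwise
  · rw [List.perm_iff_count]
    intro x
    by_cases hx : x ∈ (["<ctrl>", "<shift>", "<alt>"] : List String)
    · rw [List.count_filter (by simpa using hx)]
      fin_cases hx <;> simp [List.count_append, List.count_replicate]
    · have h0 : (ks.filter (fun k => decide (k ∈ ["<ctrl>", "<shift>", "<alt>"]))).count x = 0 := by
        rw [List.count_eq_zero]
        intro hmem
        have := List.of_mem_filter hmem
        simp only [decide_eq_true_eq] at this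
        exact hx this
      rw [h0, List.count_eq_zero]
      intro hmem
      simp only [List.mem_append, List.mem_replicate] at hmem
      simp only [List.mem_cons, List.not_mem_nil, or_false, not_or] at hx
      rcases hmem with (h | h) | h <;> exact absurd h.2 (by tauto)
  · rw [List.pairwise_append]
    refine ⟨?_, List.pairwise_replicate.mpr (Or.inr le_rfl), ?_⟩
    · rw [List.pairwise_append]
      refine ⟨List.pairwise_replicate.mpr (Or.inr le_rfl),
              List.pairwise_replicate.mpr (Or.inr le_rfl), ?_⟩
      intro a ha b hb
      rw [List.eq_of_mem_replicate ha, List.eq_of_mem_replicate hb]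
      exact mod_le_helper.1
    · intro a ha b hb
      rw [List.eq_of_mem_replicate hb]
      simp only [List.mem_append, List.mem_replicate] at ha
      rcases ha with h | h <;> rw [h.2]
      · exact mod_le_helper.2.1
      · exact mod_le_helper.2.2

-- ===== VERDICT (by name: the statement is the Claim_ definition above) =====
theorem combine_keys_spec : Claim_equal_combine_keys := by
  intro ks _
  show combine_keys ks = combine_keys_alt ks
  unfold combine_keys combine_keys_alt
  simp only [A_fold_eq, B_fold_eq, List.nil_append, Nat.zero_add]
  rw [sorted_mods]
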